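-- pv_equiv track=rewrite | github.com/dsmldlql/leetcode | Easy/69. Sqrt(x).py | splitX
-- ===== SOURCE A (Python) =====
-- def splitX(x: int) -> list:
--     str_x = str(x)
--     if len(str_x) % 2 == 0:
--         lst_x = [str_x[i:i + 2] for i in range(0, len(str_x), 2)]
--     else:
--         lst_x = [str_x[i:i + 2] for i in range(1, len(str_x), 2)]
--         lst_x.insert(0, str_x[0])
--     return lst_x
-- ===== SOURCE B (Python) =====
-- def splitX(x: int) -> list:
--     s = str(x)
--     res = []
--     i = len(s)
--     while i > 0:
--         res = [s[max(0, i - 2):i]] + res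
--         i -= 2
--     return res
-- ===== Notes on version B (the rewrite author's own statement) =====
-- stated objective: simpler
-- what changed: Replaces the even/odd parity branch with its two range comprehensions and an insert by a single right-to-left while loop that repeatedly prepends the last remaining pair of characters (a shorter final chunk falls out of the clamped slice), so the odd-length leading chunk needs no special case.
import Mathlib
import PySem

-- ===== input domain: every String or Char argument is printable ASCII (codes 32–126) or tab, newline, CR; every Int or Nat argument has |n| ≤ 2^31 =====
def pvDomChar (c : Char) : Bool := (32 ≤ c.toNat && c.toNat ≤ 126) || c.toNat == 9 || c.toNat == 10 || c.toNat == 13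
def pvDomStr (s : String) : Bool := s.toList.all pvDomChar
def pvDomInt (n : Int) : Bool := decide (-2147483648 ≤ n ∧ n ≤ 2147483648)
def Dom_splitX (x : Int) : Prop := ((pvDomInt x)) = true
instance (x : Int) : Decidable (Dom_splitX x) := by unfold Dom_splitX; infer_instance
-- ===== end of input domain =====

-- B replaces A's even/odd parity branch (two comprehensions + an insert) by one
-- right-to-left loop prepending the last remaining chunk; objective: simpler.

-- ===== PORT A =====
def splitX (x : Int) : List String :=
  let str_x := PySem.Int.toStr x
  if PySem.Str.len str_x % 2 == 0 then
    (PySem.List.pyRange 0 (PySem.Str.len str_x) 2).map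
      (fun i => PySem.Str.slice str_x (some i) (some (i + 2)))
  else
    let lst_x := (PySem.List.pyRange 1 (PySem.Str.len str_x) 2).map
      (fun i => PySem.Str.slice str_x (some i) (some (i + 2)))
    match PySem.Str.pyGet? str_x 0 with
    | some c => PySem.List.insert lst_x 0 (String.ofList [c])  -- lst_x.insert(0, str_x[0])
    | none => lst_x  -- IndexError branch: unreachable, str(x) is never empty

-- ===== PORT B =====
-- loop counter i kept as a Nat: Python's i only goes below 0 on the final
-- decrement (after which the loop exits), and max(0, i - 2) is Nat subtraction
def splitXGo (s : String) (i : Nat) (res : List String) : List String :=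
  if i = 0 then res
  else splitXGo s (i - 2)
    ([PySem.Str.slice s (some ((i - 2 : Nat) : Int)) (some ((i : Nat) : Int))] ++ res)
termination_by i
decreasing_by omega

def splitX_alt (x : Int) : List String :=
  let s := PySem.Int.toStr x
  splitXGo s s.toList.length []

-- ===== PRECONDITION & SPEC =====
def Spec_splitX (x : Int) (out : List String) : Prop := out = splitX_alt x
instance (x : Int) (out : List String) : Decidable (Spec_splitX x out) := by unfold Spec_splitX; infer_instance

-- ===== CLAIM (what is proved, stated in full; the proofs are below) =====
def Claim_equal_splitX : Prop := ∀ (x : Int), Dom_splitX x → Spec_splitX x (splitX x)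

-- ===== LEMMAS AND PROOFS =====

lemma insert_zero {α : Type} (xs : List α) (v : α) : PySem.List.insert xs 0 v = v :: xs := by
  simp [PySem.List.insert, PySem.List.sliceIndices]

lemma toDigitsCore_ne_nil (b f n : Nat) (d : Char) (ds : List Char) :
    Nat.toDigitsCore b f n (d :: ds) ≠ [] := by
  induction f generalizing n d ds with
  | zero => simp [Nat.toDigitsCore]
  | succ f ih =>
      simp only [Nat.toDigitsCore]
      split
      · simp
      · exact ih _ _ _

lemma toStr_toList_ne_nil (x : Int) : (PySem.Int.toStr x).toList ≠ [] := by
  have h : ∀ m : Nat, Nat.toDigits 10 m ≠ [] := by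
    intro m
    unfold Nat.toDigits
    simp only [Nat.toDigitsCore]
    split
    · simp
    · exact toDigitsCore_ne_nil _ _ _ _ _
  simp only [PySem.Int.toStr, PySem.Int.toChars]
  split
  · simp
  · simpa using h _

lemma splitXGo_even (s : String) (k : Nat) (acc : List String) :
    splitXGo s (2 * k) acc =
      (List.range k).map (fun (j : Nat) =>
        PySem.Str.slice s (some (0 + 2 * (j : Int))) (some (0 + 2 * (j : Int) + 2))) ++ acc := by
  induction k generalizing acc with
  | zero => simp [splitXGo]
  | succ k ih =>
      rw [splitXGo, if_neg (by omega : ¬ 2 * (k + 1) = 0)]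
      have h2 : 2 * (k + 1) - 2 = 2 * k := by omega
      have e1 : ((2 * k : Nat) : Int) = 0 + 2 * (k : Int) := by push_cast; ring
      have e2 : ((2 * (k + 1) : Nat) : Int) = 0 + 2 * (k : Int) + 2 := by push_cast; ring
      rw [h2, e1, e2, ih, List.range_succ]
      simp

lemma splitXGo_odd (s : String) (k : Nat) (acc : List String) :
    splitXGo s (2 * k + 1) acc =
      PySem.Str.slice s (some 0) (some 1) ::
        ((List.range k).map (fun (j : Nat) =>
          PySem.Str.slice s (some (1 + 2 * (j : Int))) (some (1 + 2 * (j : Int) + 2))) ++ acc) := by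
  induction k generalizing acc with
  | zero =>
      rw [splitXGo, if_neg (by omega : ¬ 2 * 0 + 1 = 0)]
      rw [show 2 * 0 + 1 - 2 = 0 from rfl, splitXGo]
      norm_num
  | succ k ih =>
      rw [splitXGo, if_neg (by omega : ¬ 2 * (k + 1) + 1 = 0)]
      have h2 : 2 * (k + 1) + 1 - 2 = 2 * k + 1 := by omega
      have e1 : ((2 * k + 1 : Nat) : Int) = 1 + 2 * (k : Int) := by push_cast; ring
      have e2 : ((2 * (k + 1) + 1 : Nat) : Int) = 1 + 2 * (k : Int) + 2 := by push_cast; ring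
      rw [h2, e1, e2, ih, List.range_succ]
      simp

lemma slice_zero_one (s : String) (c : Char) (t : List Char) (h : s.toList = c :: t) :
    PySem.Str.slice s (some 0) (some 1) = String.ofList [c] := by
  have h01 : PySem.List.slice s.toList (some ((0 : Nat) : Int)) (some ((1 : Nat) : Int))
      = (s.toList.drop 0).take (1 - 0) := PySem.List.slice_natCast s.toList 0 1
  simp only [PySem.Str.slice, PySem.Chars.slice_eq_listSlice]
  norm_num at h01
  rw [PySem.List.slice_zero_start, h01, h]
  rfl

theorem splitX_spec' (x : Int) : splitX x = splitX_alt x := by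
  unfold splitX splitX_alt
  have hne := toStr_toList_ne_nil x
  set s := PySem.Int.toStr x with hs
  clear_value s
  simp only [PySem.Str.len]
  rcases Nat.even_or_odd s.toList.length with ⟨k, hk'⟩ | ⟨k, hk⟩
  · -- even length 2k
    have hk : s.toList.length = 2 * k := by omega
    rw [hk]
    rw [if_pos (by simp)]
    rw [PySem.List.pyRange_of_pos 0 ((2 * k : Nat) : Int) (by norm_num)]
    have hc : (if (0 : Int) < ((2 * k : Nat) : Int)
        then ((((2 * k : Nat) : Int) - 0 + 2 - 1) / 2).toNat else 0) = k := by
      split <;> omega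
    rw [hc, List.map_map, splitXGo_even]
    simp [Function.comp]
  · -- odd length 2k+1
    rw [hk]
    rw [if_neg (by simp)]
    obtain ⟨c, t, hct⟩ := List.exists_cons_of_ne_nil hne
    have hget : PySem.Str.pyGet? s 0 = some c := by
      simp [PySem.Str.pyGet?, PySem.Chars.pyGet?_eq_listPyGet?, PySem.List.pyGet?,
        PySem.List.pyIdx?, hct]
    rw [hget]
    rw [PySem.List.pyRange_of_pos 1 ((2 * k + 1 : Nat) : Int) (by norm_num)]
    have hc : (if (1 : Int) < ((2 * k + 1 : Nat) : Int)
        then ((((2 * k + 1 : Nat) : Int) - 1 + 2 - 1) / 2).toNat else 0) = k := by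
      split <;> omega
    rw [hc, List.map_map]
    simp only [insert_zero]
    rw [splitXGo_odd, slice_zero_one s c t hct]
    simp [Function.comp]

-- ===== VERDICT (by name: the statement is the Claim_ definition above) =====
theorem splitX_spec : Claim_equal_splitX := by
  intro x _
  unfold Spec_splitX
  exact splitX_spec' x
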